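-- pv_equiv track=rewrite | github.com/mval23/Fundamentos_Programacion_2023-1 | funciones2/julianachi.py | julianchi
-- ===== SOURCE A (Python) =====
-- def divisors(n):
--     divs = 0
--     for i in range(1, n + 1):
--         if n % i == 0:
--             divs += 1
--     return divs
--
-- def julianchi(n):
--     """
--     El primer elemento de la serie es el número 1
--     Cada elemento es igual al elemento anterior más la cantidad
--     de divisores de ese elemento anterior
--     :param n:
--     :return: si hacen o no parte de la serie
--     """
--     julianchi_nums = [1]
--     julianchi_divs = [1]
--     i = 0
--
--     while n > julianchi_nums[i]:
--         julianchi_nums.append(julianchi_divs[i] + julianchi_nums[i])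
--         julianchi_divs.append(divisors(julianchi_nums[i + 1]))
--         i += 1
--
--     if n in julianchi_nums:
--         return 'Pertenece a la serie de Julianachi'
--     else:
--         return 'No pertenece a la serie de Julianachi'
-- ===== SOURCE B (Python) =====
-- def divisors(m):
--     count = 0
--     i = 1
--     while i * i <= m:
--         if m % i == 0:
--             count += 1 if i * i == m else 2
--         i += 1
--     return count
--
-- def julianchi(n):
--     current = 1
--     while current < n:
--         current += divisors(current)
--     if current == n:
--         return 'Pertenece a la serie de Julianachi'
--     return 'No pertenece a la serie de Julianachi'
-- ===== Notes on version B (the rewrite author's own statement) =====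
-- stated objective: faster
-- what changed: B counts divisors by the sqrt pairing method (loop i while i*i<=m, counting each divisor pair i and m/i at once, 1 at a perfect square) instead of A's full trial division over 1..m, and replaces A's two parallel lists plus final 'n in list' membership scan by a single integer cursor with one equality test.
import Mathlib
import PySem

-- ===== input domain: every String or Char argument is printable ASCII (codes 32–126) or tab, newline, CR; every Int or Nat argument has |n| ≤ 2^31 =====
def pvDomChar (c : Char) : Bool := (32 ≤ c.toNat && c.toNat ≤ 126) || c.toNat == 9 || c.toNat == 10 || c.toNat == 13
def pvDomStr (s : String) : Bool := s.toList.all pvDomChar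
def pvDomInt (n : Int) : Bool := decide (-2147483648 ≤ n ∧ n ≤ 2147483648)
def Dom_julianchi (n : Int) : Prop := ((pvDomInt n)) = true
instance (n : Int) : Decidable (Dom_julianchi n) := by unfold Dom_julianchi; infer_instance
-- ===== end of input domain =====

-- B counts divisors by sqrt pairing (i while i*i<=m, counting i and m/i together) instead of
-- A's full trial division over 1..m, and replaces A's two parallel lists and final membership
-- scan by a single cursor with one equality test (objective: faster).

-- ===== PORT A =====
-- port of helper divisors(n): full trial division over range(1, n+1)
def divisorsZ (n : Int) : Int :=
  (PySem.List.pyRange 1 (n + 1) 1).foldl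
    (fun divs i => if PySem.Int.mod n i = 0 then divs + 1 else divs) 0

-- A's while loop; the fuel only makes the recursion total (never exhausted on the actual
-- calls, since the appended numbers start at 1 and strictly increase)
def julianchiLoop (fuel : Nat) (n : Int) (nums divs : List Int) (i : Int) :
    List Int × List Int × Int :=
  match fuel with
  | 0 => (nums, divs, i)
  | fuel + 1 =>
    if n > PySem.List.pyGetD nums i 0 then
      let newNum := PySem.List.pyGetD divs i 0 + PySem.List.pyGetD nums i 0
      julianchiLoop fuel n (nums ++ [newNum]) (divs ++ [divisorsZ newNum]) (i + 1)
    else (nums, divs, i)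

def julianchi (n : Int) : String :=
  let s := julianchiLoop (n.toNat + 1) n [1] [1] 0
  if s.1.contains n then "Pertenece a la serie de Julianachi"
  else "No pertenece a la serie de Julianachi"

-- ===== PORT B =====
-- B's divisors(m): while i*i <= m, a dividing i below the square root counts the pair
-- {i, m/i} at once (1 at i*i = m); fuel again only totalises the while loop
def divisorsB_loop (fuel : Nat) (m i count : Int) : Int :=
  match fuel with
  | 0 => count
  | fuel + 1 =>
    if i * i ≤ m then
      divisorsB_loop fuel m (i + 1)
        (if PySem.Int.mod m i = 0 then (if i * i = m then count + 1 else count + 2) else count)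
    else count

def divisorsB (m : Int) : Int := divisorsB_loop (m.toNat + 1) m 1 0

-- B's while loop: a single cursor instead of A's two lists
def altLoop (fuel : Nat) (n current : Int) : Int :=
  match fuel with
  | 0 => current
  | fuel + 1 =>
    if current < n then altLoop fuel n (current + divisorsB current) else current

def julianchi_alt (n : Int) : String :=
  let current := altLoop (n.toNat + 1) n 1
  if current = n then "Pertenece a la serie de Julianachi"
  else "No pertenece a la serie de Julianachi"

-- ===== PRECONDITION & SPEC =====
def Spec_julianchi (n : Int) (out : String) : Prop := out = julianchi_alt n
instance (n : Int) (out : String) : Decidable (Spec_julianchi n out) := by unfold Spec_julianchi; infer_instance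

-- ===== CLAIM (what is proved, stated in full; the proofs are below) =====
def Claim_equal_julianchi : Prop := ∀ (n : Int), Dom_julianchi n → Spec_julianchi n (julianchi n)

-- ===== LEMMAS AND PROOFS =====

-- the positive divisors of N and their partition at the square root
def divFS (N : Nat) : Finset Nat := (Finset.range (N + 1)).filter (fun d => 0 < d ∧ d ∣ N)
def smallFS (N : Nat) : Finset Nat := (divFS N).filter (fun d => d * d < N)
def eqFS (N : Nat) : Finset Nat := (divFS N).filter (fun d => d * d = N)
def largeFS (N : Nat) : Finset Nat := (divFS N).filter (fun d => N < d * d)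

lemma mem_divFS {N d : Nat} (hN : 1 ≤ N) : d ∈ divFS N ↔ 0 < d ∧ d ∣ N := by
  unfold divFS
  simp only [Finset.mem_filter, Finset.mem_range]
  constructor
  · rintro ⟨_, h⟩; exact h
  · rintro ⟨hd, hdvd⟩
    exact ⟨Nat.lt_succ_of_le (Nat.le_of_dvd (by omega) hdvd), hd, hdvd⟩

lemma countP_range_card (M : Nat) (p : Nat → Bool) :
    (List.range M).countP p = ((Finset.range M).filter (fun k => p k = true)).card := by
  induction M with
  | zero => simp
  | succ M ih =>
    rw [List.range_succ, List.countP_append, Finset.range_add_one, Finset.filter_insert]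
    by_cases h : p M = true
    · rw [if_pos h, Finset.card_insert_of_notMem (by simp), ← ih]
      simp [h]
    · rw [if_neg h, ← ih]
      simp [h]

lemma divisorsZ_countP (m : Int) :
    divisorsZ m = ((PySem.List.pyRange 1 (m + 1) 1).countP (fun i => decide (PySem.Int.mod m i = 0)) : Int) := by
  unfold divisorsZ
  rw [show (fun (divs : Int) (i : Int) => if PySem.Int.mod m i = 0 then divs + 1 else divs)
      = (fun acc x => if (fun i => decide (PySem.Int.mod m i = 0)) x = true then acc + 1 else acc) by
    funext d i; simp]
  rw [PySem.List.foldl_count_if]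
  simp

lemma filter_ge_split (T : Finset Nat) (i : Nat) :
    (T.filter (fun d => i ≤ d)).card
      = (T.filter (fun d => i + 1 ≤ d)).card + (if i ∈ T then 1 else 0) := by
  by_cases h : i ∈ T
  · have he : T.filter (fun d => i ≤ d) = insert i (T.filter (fun d => i + 1 ≤ d)) := by
      ext d
      simp only [Finset.mem_filter, Finset.mem_insert]
      constructor
      · rintro ⟨hd, hle⟩
        rcases Nat.eq_or_lt_of_le hle with heq | hlt
        · exact Or.inl heq.symm
        · exact Or.inr ⟨hd, hlt⟩
      · rintro (rfl | ⟨hd, hle⟩)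
        · exact ⟨h, le_rfl⟩
        · exact ⟨hd, by omega⟩
    rw [he, Finset.card_insert_of_notMem (by simp), if_pos h]
  · have he : T.filter (fun d => i ≤ d) = T.filter (fun d => i + 1 ≤ d) := by
      apply Finset.filter_congr
      intro d hd
      have : d ≠ i := fun heq => h (heq ▸ hd)
      constructor <;> intro <;> simp_all <;> omega
    rw [he, if_neg h]
    omega

-- partition of the divisor count at the square root
lemma card_divFS_split (N : Nat) :
    (divFS N).card = (smallFS N).card + (eqFS N).card + (largeFS N).card := by
  have h1 := Finset.card_filter_add_card_filter_not (s := divFS N) (p := fun d => d * d < N)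
  have h2 := Finset.card_filter_add_card_filter_not (s := (divFS N).filter (fun d => ¬ d * d < N)) (p := fun d => d * d = N)
  have he : ((divFS N).filter (fun d => ¬ d * d < N)).filter (fun d => d * d = N) = eqFS N := by
    unfold eqFS
    rw [Finset.filter_filter]
    apply Finset.filter_congr
    intro d _
    constructor
    · rintro ⟨_, h⟩; exact h
    · intro h; omega
  have hl : ((divFS N).filter (fun d => ¬ d * d < N)).filter (fun d => ¬ d * d = N) = largeFS N := by
    unfold largeFS
    rw [Finset.filter_filter]
    apply Finset.filter_congr
    intro d _
    constructor
    · rintro ⟨h1, h2⟩; omega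
    · intro h; omega
  rw [he, hl] at h2
  unfold smallFS
  omega

-- pairing d ↦ N / d: the divisors above the square root correspond to those below it
lemma card_large_eq_small (N : Nat) (hN : 1 ≤ N) :
    (largeFS N).card = (smallFS N).card := by
  apply Finset.card_nbij' (fun d => N / d) (fun d => N / d)
  · intro d hd
    simp only [largeFS, Finset.coe_filter, Set.mem_setOf_eq, mem_divFS hN] at hd
    obtain ⟨⟨hd0, hdvd⟩, hlarge⟩ := hd
    have hq : N / d * d = N := Nat.div_mul_cancel hdvd
    have hq0 : 0 < N / d := Nat.div_pos (Nat.le_of_dvd (by omega) hdvd) hd0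
    have hqd : N / d < d := by
      by_contra h
      have : d * d ≤ N / d * d := Nat.mul_le_mul_right d (Nat.le_of_not_lt h)
      omega
    simp only [smallFS, Finset.coe_filter, Set.mem_setOf_eq, mem_divFS hN]
    refine ⟨⟨hq0, ⟨d, hq.symm ▸ (Nat.div_mul_cancel hdvd).symm⟩⟩, ?_⟩
    · calc N / d * (N / d) < d * (N / d) := (Nat.mul_lt_mul_right hq0).mpr hqd
        _ = N := by rw [Nat.mul_comm]; exact hq
  · intro d hd
    simp only [smallFS, Finset.coe_filter, Set.mem_setOf_eq, mem_divFS hN] at hd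
    obtain ⟨⟨hd0, hdvd⟩, hsmall⟩ := hd
    have hq : N / d * d = N := Nat.div_mul_cancel hdvd
    have hq0 : 0 < N / d := Nat.div_pos (Nat.le_of_dvd (by omega) hdvd) hd0
    have hqd : d < N / d := by
      by_contra h
      have : N / d * d ≤ d * d := Nat.mul_le_mul_right d (Nat.le_of_not_lt h)
      omega
    simp only [largeFS, Finset.coe_filter, Set.mem_setOf_eq, mem_divFS hN]
    refine ⟨⟨hq0, ⟨d, hq.symm ▸ (Nat.div_mul_cancel hdvd).symm⟩⟩, ?_⟩
    · calc N = N / d * d := hq.symm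
        _ < N / d * (N / d) := (Nat.mul_lt_mul_left hq0).mpr hqd
  · intro d hd
    simp only [largeFS, Finset.coe_filter, Set.mem_setOf_eq, mem_divFS hN] at hd
    exact Nat.div_div_self hd.1.2 (by omega)
  · intro d hd
    simp only [smallFS, Finset.coe_filter, Set.mem_setOf_eq, mem_divFS hN] at hd
    exact Nat.div_div_self hd.1.2 (by omega)

-- A's trial-division counter computes the number of positive divisors
lemma divisorsZ_eq_card (N : Nat) (hN : 1 ≤ N) :
    divisorsZ (N : Int) = ((divFS N).card : Int) := by
  rw [divisorsZ_countP]
  congr 1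
  rw [PySem.List.pyRange_one, List.countP_map]
  have hM : ((N : Int) + 1 - 1).toNat = N := by omega
  rw [hM]
  have hp : ∀ k ∈ List.range N,
      (((fun i => decide (PySem.Int.mod (N : Int) i = 0)) ∘ (fun k : Nat => 1 + (k : Int))) k = true)
        ↔ ((fun k => decide ((k + 1) ∣ N)) k = true) := by
    intro k _
    simp only [Function.comp_apply, decide_eq_true_eq, PySem.Int.mod_eq_zero_iff_dvd]
    constructor
    · intro h
      have : ((k + 1 : Nat) : Int) ∣ (N : Int) := by push_cast; rwa [add_comm]
      exact_mod_cast this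
    · intro h
      have : ((k + 1 : Nat) : Int) ∣ (N : Int) := by exact_mod_cast h
      push_cast at this
      rwa [add_comm] at this
  rw [List.countP_congr hp, countP_range_card]
  apply Finset.card_nbij' (fun k => k + 1) (fun d => d - 1)
  · intro k hk
    simp only [Finset.coe_filter, Set.mem_setOf_eq, Finset.mem_range, decide_eq_true_eq] at hk
    simp only [Finset.mem_coe, mem_divFS hN]
    exact ⟨by omega, hk.2⟩
  · intro d hd
    simp only [Finset.mem_coe, mem_divFS hN] at hd
    simp only [Finset.coe_filter, Set.mem_setOf_eq, Finset.mem_range, decide_eq_true_eq]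
    obtain ⟨hd0, hdvd⟩ := hd
    have hle := Nat.le_of_dvd (by omega) hdvd
    refine ⟨by omega, ?_⟩
    rwa [Nat.sub_add_cancel hd0]
  · intro k _
    simp
  · intro d hd
    simp only [Finset.mem_coe, mem_divFS hN] at hd
    have h1 := hd.1
    show d - 1 + 1 = d
    omega

-- B's paired counter, loop invariant
lemma divisorsB_loop_spec (N : Nat) (hN : 1 ≤ N) :
    ∀ (fuel : Nat) (i : Nat), 1 ≤ i → N < (i + fuel) * (i + fuel) → ∀ (count : Int),
      divisorsB_loop fuel (N : Int) (i : Int) count =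
        count + 2 * (((smallFS N).filter (fun d => i ≤ d)).card : Int)
              + (((eqFS N).filter (fun d => i ≤ d)).card : Int) := by
  intro fuel
  induction fuel with
  | zero =>
    intro i hi hfuel count
    simp only [Nat.add_zero] at hfuel
    have hs : (smallFS N).filter (fun d => i ≤ d) = ∅ := by
      apply Finset.filter_eq_empty_iff.mpr
      intro d hd
      simp only [smallFS, Finset.mem_filter] at hd
      intro hle
      have : i * i ≤ d * d := Nat.mul_le_mul hle hle
      omega
    have he : (eqFS N).filter (fun d => i ≤ d) = ∅ := by
      apply Finset.filter_eq_empty_iff.mpr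
      intro d hd
      simp only [eqFS, Finset.mem_filter] at hd
      intro hle
      have : i * i ≤ d * d := Nat.mul_le_mul hle hle
      omega
    simp [divisorsB_loop, hs, he]
  | succ fuel ih =>
    intro i hi hfuel count
    rw [divisorsB_loop]
    by_cases hcond : (i : Int) * (i : Int) ≤ (N : Int)
    · rw [if_pos hcond]
      have hii : i * i ≤ N := by exact_mod_cast hcond
      have hrec := ih (i + 1) (by omega)
        (by have h' : i + 1 + fuel = i + (fuel + 1) := by omega
            rw [h']; exact hfuel)
      push_cast at hrec
      rw [hrec]
      have hdvd_iff : PySem.Int.mod (N : Int) (i : Int) = 0 ↔ i ∣ N := by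
        rw [PySem.Int.mod_eq_zero_iff_dvd]
        exact Int.natCast_dvd_natCast
      have hsq_iff : (i : Int) * (i : Int) = (N : Int) ↔ i * i = N := by
        constructor <;> intro h <;> exact_mod_cast h
      have hS := filter_ge_split (smallFS N) i
      have hE := filter_ge_split (eqFS N) i
      by_cases hdvd : i ∣ N
      · rw [if_pos (hdvd_iff.mpr hdvd)]
        by_cases hsq : i * i = N
        · rw [if_pos (hsq_iff.mpr hsq)]
          have hiE : i ∈ eqFS N := by
            simp only [eqFS, Finset.mem_filter, mem_divFS hN]
            exact ⟨⟨by omega, hdvd⟩, hsq⟩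
          have hiS : i ∉ smallFS N := by
            simp only [smallFS, Finset.mem_filter]
            rintro ⟨_, h⟩; omega
          rw [if_pos hiE] at hE
          rw [if_neg hiS] at hS
          omega
        · rw [if_neg (fun h => hsq (hsq_iff.mp h))]
          have hiS : i ∈ smallFS N := by
            simp only [smallFS, Finset.mem_filter, mem_divFS hN]
            exact ⟨⟨by omega, hdvd⟩, by omega⟩
          have hiE : i ∉ eqFS N := by
            simp only [eqFS, Finset.mem_filter]
            rintro ⟨_, h⟩; omega
          rw [if_pos hiS] at hS
          rw [if_neg hiE] at hE
          omega
      · rw [if_neg (fun h => hdvd (hdvd_iff.mp h))]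
        have hiS : i ∉ smallFS N := by
          simp only [smallFS, Finset.mem_filter, mem_divFS hN]
          rintro ⟨⟨_, h⟩, _⟩; exact hdvd h
        have hiE : i ∉ eqFS N := by
          simp only [eqFS, Finset.mem_filter, mem_divFS hN]
          rintro ⟨⟨_, h⟩, _⟩; exact hdvd h
        rw [if_neg hiS] at hS
        rw [if_neg hiE] at hE
        omega
    · rw [if_neg hcond]
      have hii : N < i * i := by
        by_contra h
        exact hcond (by exact_mod_cast Nat.le_of_not_lt h)
      have hs : (smallFS N).filter (fun d => i ≤ d) = ∅ := by
        apply Finset.filter_eq_empty_iff.mpr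
        intro d hd
        simp only [smallFS, Finset.mem_filter] at hd
        intro hle
        have : i * i ≤ d * d := Nat.mul_le_mul hle hle
        omega
      have he : (eqFS N).filter (fun d => i ≤ d) = ∅ := by
        apply Finset.filter_eq_empty_iff.mpr
        intro d hd
        simp only [eqFS, Finset.mem_filter] at hd
        intro hle
        have : i * i ≤ d * d := Nat.mul_le_mul hle hle
        omega
      simp [hs, he]

lemma divisorsB_eq_divisorsZ (m : Int) (hm : 1 ≤ m) : divisorsB m = divisorsZ m := by
  set N := m.toNat with hNdef
  have hmN : m = (N : Int) := by omega
  have hN : 1 ≤ N := by omega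
  have hfuel : N < (1 + (N + 1)) * (1 + (N + 1)) := by nlinarith
  have hB : divisorsB m = 2 * (((smallFS N).filter (fun d => 1 ≤ d)).card : Int)
      + (((eqFS N).filter (fun d => 1 ≤ d)).card : Int) := by
    unfold divisorsB
    rw [hmN, show ((N : Int).toNat) = N by omega,
      show (1 : Int) = ((1 : Nat) : Int) by norm_num,
      divisorsB_loop_spec N hN (N + 1) 1 le_rfl hfuel 0]
    ring
  have hSfull : (smallFS N).filter (fun d => 1 ≤ d) = smallFS N := by
    apply Finset.filter_true_of_mem
    intro d hd
    simp only [smallFS, Finset.mem_filter, mem_divFS hN] at hd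
    omega
  have hEfull : (eqFS N).filter (fun d => 1 ≤ d) = eqFS N := by
    apply Finset.filter_true_of_mem
    intro d hd
    simp only [eqFS, Finset.mem_filter, mem_divFS hN] at hd
    omega
  rw [hSfull, hEfull] at hB
  have hZ : divisorsZ m = ((divFS N).card : Int) := by rw [hmN]; exact divisorsZ_eq_card N hN
  have hsplit := card_divFS_split N
  have hls := card_large_eq_small N hN
  rw [hB, hZ]
  push_cast [hsplit, hls]
  ring

-- A's counter never counts below its accumulator (gives divisorsZ m ≥ 0)
lemma divisorsZ_nonneg (m : Int) : 0 ≤ divisorsZ m := by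
  rw [divisorsZ_countP]
  positivity

-- B's loop with the generic counter replaced by A's (proof device)
def altLoopZ (fuel : Nat) (n current : Int) : Int :=
  match fuel with
  | 0 => current
  | fuel + 1 =>
    if current < n then altLoopZ fuel n (current + divisorsZ current) else current

lemma altLoop_eq_altLoopZ (fuel : Nat) (n : Int) :
    ∀ (c : Int), 1 ≤ c → altLoop fuel n c = altLoopZ fuel n c := by
  induction fuel with
  | zero => intro c _; rfl
  | succ fuel ih =>
    intro c hc
    rw [altLoop, altLoopZ, divisorsB_eq_divisorsZ c hc]
    by_cases h : c < n
    · simp only [h, if_true]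
      exact ih _ (by have := divisorsZ_nonneg c; omega)
    · simp [h]

-- A's loop, started on nums = xs ++ [c] (every element of xs below n) and on the
-- synchronous divs list ys ++ [divisorsZ c] of the same length, ends in a nums list
-- containing n exactly when the scalar loop started at c ends at n: both advance the
-- last element / the cursor by the same amount divisorsZ of it.
lemma loop_key (fuel : Nat) (n : Int) :
    ∀ (xs ys : List Int) (c : Int), ys.length = xs.length → (∀ x ∈ xs, x < n) →
      ((julianchiLoop fuel n (xs ++ [c]) (ys ++ [divisorsZ c]) (xs.length : Int)).1.contains n
        ↔ altLoopZ fuel n c = n) := by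
  induction fuel with
  | zero =>
    intro xs ys c _ hlt
    simp only [julianchiLoop, altLoopZ, List.contains_eq_mem, List.mem_append,
      List.mem_singleton, decide_eq_true_eq]
    constructor
    · rintro (h | h)
      · exact absurd rfl (hlt n h).ne
      · exact h.symm
    · intro h; exact Or.inr h.symm
  | succ fuel ih =>
    intro xs ys c hlen hlt
    have hget : PySem.List.pyGetD (xs ++ [c]) (xs.length : Int) 0 = c := by
      simp [PySem.List.pyGetD_natCast, List.getD]
    have hgetd : PySem.List.pyGetD (ys ++ [divisorsZ c]) (xs.length : Int) 0 = divisorsZ c := by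
      simp [PySem.List.pyGetD_natCast, List.getD, ← hlen]
    rw [julianchiLoop, altLoopZ, hget, hgetd]
    by_cases hc : c < n
    · simp only [hc, if_true]
      have hxs : ∀ x ∈ xs ++ [c], x < n := by
        intro x hx
        rcases List.mem_append.mp hx with h | h
        · exact hlt x h
        · rw [List.mem_singleton.mp h]; exact hc
      have := ih (xs ++ [c]) (ys ++ [divisorsZ c]) (divisorsZ c + c)
        (by simp [hlen]) hxs
      simp only [List.length_append, List.length_singleton, Nat.cast_add,
        Nat.cast_one] at this
      rw [this, add_comm (divisorsZ c) c]
    · simp only [gt_iff_lt, if_neg hc]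
      simp only [List.contains_eq_mem, List.mem_append, List.mem_singleton,
        decide_eq_true_eq]
      constructor
      · rintro (h | h)
        · exact absurd rfl (hlt n h).ne
        · exact h.symm
      · intro h; exact Or.inr h.symm

-- ===== VERDICT =====
theorem julianchi_spec : Claim_equal_julianchi := by
  intro n _
  unfold Spec_julianchi julianchi julianchi_alt
  have h1 : divisorsZ 1 = 1 := by decide
  have halt := altLoop_eq_altLoopZ (n.toNat + 1) n 1 (by norm_num)
  have := loop_key (n.toNat + 1) n [] [] 1 rfl (by simp)
  simp only [List.nil_append, List.length_nil, Nat.cast_zero, h1] at this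
  simp only [halt, this]
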